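-- pv_equiv track=rewrite | github.com/jordicor/Atagia | src/atagia/memory/text_chunker.py | _find_split_index
-- ===== SOURCE A (Python) =====
-- def _find_split_index(text: str, rough_index: int) -> int:
--     if rough_index >= len(text):
--         return len(text)
--     for offset in range(0, 200):
--         right = rough_index + offset
--         if right < len(text) and text[right].isspace():
--             return right
--         left = rough_index - offset
--         if left > 0 and text[left].isspace():
--             return left
--     return min(len(text), rough_index)
-- ===== SOURCE B (Python) =====
-- def _find_split_index(text: str, rough_index: int) -> int:
--     n = len(text)
--     if rough_index >= n:
--         return n
--     right = None
--     for i in range(rough_index, rough_index + 200):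
--         if i < n and text[i].isspace():
--             right = i
--             break
--     left = None
--     for i in range(rough_index, rough_index - 200, -1):
--         if i > 0 and text[i].isspace():
--             left = i
--             break
--     if right is not None:
--         if left is None or right - rough_index <= rough_index - left:
--             return right
--     if left is not None:
--         return left
--     return min(n, rough_index)
-- ===== Notes on version B (the rewrite author's own statement) =====
-- stated objective: alternative
-- what changed: Replaces A's single interleaved loop (checking right then left at each growing offset) by two independent directional first-hit scans whose results are merged with a right-wins-on-ties rule.
import Mathlib
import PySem

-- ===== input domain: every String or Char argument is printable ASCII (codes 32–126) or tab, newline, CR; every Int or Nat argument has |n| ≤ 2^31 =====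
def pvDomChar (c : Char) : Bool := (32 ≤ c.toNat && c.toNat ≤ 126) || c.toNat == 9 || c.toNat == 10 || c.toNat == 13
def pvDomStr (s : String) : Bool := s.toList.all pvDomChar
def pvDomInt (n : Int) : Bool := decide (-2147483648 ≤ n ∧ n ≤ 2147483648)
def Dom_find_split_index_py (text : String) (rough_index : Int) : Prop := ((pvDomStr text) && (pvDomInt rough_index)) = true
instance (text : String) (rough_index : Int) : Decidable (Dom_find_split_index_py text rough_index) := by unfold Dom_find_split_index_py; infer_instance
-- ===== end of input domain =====

-- B replaces A's single interleaved right/left loop by two directional first-hit scans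
-- merged with the same right-wins-on-ties rule (objective: alternative decomposition, same cost).

-- text[i].isspace() under Python indexing (negative i from the end); false default is
-- only reachable outside Pre_ (where the Pythons raise IndexError).
def pvSpaceAt (tl : List Char) (i : Int) : Bool :=
  ((PySem.List.pyGet? tl i).map PySem.Chars.isspace).getD false

-- ===== PORT A =====
-- A's loop 'for offset in range(0, 200)': offset is the current offset, fuel the remaining iterations.
def findSplitLoopA (tl : List Char) (rough : Int) (offset : Int) (fuel : Nat) : Int :=
  match fuel with
  | 0 => min (tl.length : Int) rough
  | Nat.succ f =>
    let right := rough + offset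
    if right < (tl.length : Int) && pvSpaceAt tl right then right
    else
      let left := rough - offset
      if 0 < left && pvSpaceAt tl left then left
      else findSplitLoopA tl rough (offset + 1) f

def find_split_index_py (text : String) (rough_index : Int) : Int :=
  if (text.toList.length : Int) ≤ rough_index then (text.toList.length : Int)
  else findSplitLoopA text.toList rough_index 0 200

-- ===== PORT B =====
def find_split_index_py_alt (text : String) (rough_index : Int) : Int :=
  if (text.toList.length : Int) ≤ rough_index then (text.toList.length : Int)
  else
    match (PySem.List.pyRange rough_index (rough_index + 200) 1).find?
        (fun i => i < (text.toList.length : Int) && pvSpaceAt text.toList i),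
      (PySem.List.pyRange rough_index (rough_index - 200) (-1)).find?
        (fun i => 0 < i && pvSpaceAt text.toList i) with
    | some r, some l => if r - rough_index ≤ rough_index - l then r else l
    | some r, none => r
    | none, some l => l
    | none, none => min (text.toList.length : Int) rough_index

-- ===== PRECONDITION & SPEC =====
-- Pre_ excludes exactly the inputs where the Pythons raise IndexError:
-- rough_index < -len(text) (and below the early-return bound), where text[rough_index] is out of range.
def Pre_find_split_index_py (text : String) (rough_index : Int) : Prop :=
  (text.toList.length : Int) ≤ rough_index ∨ -(text.toList.length : Int) ≤ rough_index
instance (text : String) (rough_index : Int) : Decidable (Pre_find_split_index_py text rough_index) := by unfold Pre_find_split_index_py; infer_instance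

def pvWitness_find_split_index_py : String × Int := ("ab cd", 3)

def Spec_find_split_index_py (text : String) (rough_index : Int) (out : Int) : Prop := out = find_split_index_py_alt text rough_index
instance (text : String) (rough_index : Int) (out : Int) : Decidable (Spec_find_split_index_py text rough_index out) := by unfold Spec_find_split_index_py; infer_instance

-- ===== CLAIM (what is proved, stated in full; the proofs are below) =====
def Claim_equal_find_split_index_py : Prop := ∀ (text : String) (rough_index : Int), Dom_find_split_index_py text rough_index → Pre_find_split_index_py text rough_index → Spec_find_split_index_py text rough_index (find_split_index_py text rough_index)

-- ===== LEMMAS AND PROOFS =====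

-- The merge step of B, with rough and n fixed.
def pvMerge (n rough : Int) (r l : Option Int) : Int :=
  match r, l with
  | some r, some l => if r - rough ≤ rough - l then r else l
  | some r, none => r
  | none, some l => l
  | none, none => min n rough

-- Main invariant: A's interleaved loop from offset k with f steps left equals the merge of
-- B's two directional first-hit scans over the corresponding index windows.
theorem loop_eq_merge (tl : List Char) (rough : Int) (f : Nat) (k : Int) :
    findSplitLoopA tl rough k f =
      pvMerge (tl.length : Int) rough
        ((PySem.List.pyRange (rough + k) (rough + k + f) 1).find?
          (fun i => i < (tl.length : Int) && pvSpaceAt tl i))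
        ((PySem.List.pyRange (rough - k) (rough - k - f) (-1)).find?
          (fun i => 0 < i && pvSpaceAt tl i)) := by
  induction f generalizing k with
  | zero =>
    simp [findSplitLoopA, pvMerge]
  | succ f ih =>
    rw [PySem.List.pyRange_one_cons (by push_cast; omega : rough + k < rough + k + (f.succ : Nat)),
      PySem.List.pyRange_neg_one_cons (by push_cast; omega : rough - k - (f.succ : Nat) < rough - k)]
    cases hR : decide (rough + k < (tl.length : Int)) && pvSpaceAt tl (rough + k) with
    | true =>
      -- right hit at offset k: any left hit is at distance ≥ k, so right wins
      cases hL : List.find? (fun i => decide (0 < i) && pvSpaceAt tl i)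
          ((rough - k) :: PySem.List.pyRange (rough - k - 1) (rough - k - (f.succ : Nat)) (-1)) with
      | none =>
        simp only [findSplitLoopA, List.find?_cons, hR, if_true, pvMerge]
      | some l =>
        have hle : l ≤ rough - k := by
          have hmem := List.mem_of_find?_eq_some hL
          rcases List.mem_cons.mp hmem with h | h
          · omega
          · rw [PySem.List.mem_pyRange_neg_one] at h; omega
        simp only [findSplitLoopA, List.find?_cons, hR, if_true, pvMerge]
        split_ifs <;> omega
    | false =>
      simp only [findSplitLoopA, List.find?_cons, hR, Bool.false_eq_true, if_false]
      cases hL : decide (0 < rough - k) && pvSpaceAt tl (rough - k) with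
      | true =>
        -- left hit at offset k, no right hit at k: any right hit is at distance > k, left wins
        simp only [if_true]
        cases hRf : List.find? (fun i => decide (i < (tl.length : Int)) && pvSpaceAt tl i)
            (PySem.List.pyRange (rough + k + 1) (rough + k + (f.succ : Nat)) 1) with
        | none => rfl
        | some r =>
          have hgt : rough + k + 1 ≤ r := by
            have hmem := List.mem_of_find?_eq_some hRf
            rw [PySem.List.mem_pyRange_one] at hmem; omega
          simp only [pvMerge]
          split_ifs <;> omega
      | false =>
        simp only [Bool.false_eq_true, if_false]
        have h1 : rough + k + 1 = rough + (k + 1) := by ring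
        have h2 : rough + k + (f.succ : Nat) = rough + (k + 1) + f := by push_cast; ring
        have h3 : rough - k - 1 = rough - (k + 1) := by ring
        have h4 : rough - k - (f.succ : Nat) = rough - (k + 1) - f := by push_cast; ring
        rw [h1, h2, h3, h4]
        exact ih (k + 1)

-- ===== VERDICT (by name: the statement is the Claim_ definition above) =====
theorem find_split_index_py_spec : Claim_equal_find_split_index_py := by
  intro text rough _ _
  unfold Spec_find_split_index_py find_split_index_py find_split_index_py_alt
  by_cases h : ((text.toList.length : Int) ≤ rough)
  · rw [if_pos h, if_pos h]
  · rw [if_neg h, if_neg h]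
    have hm := loop_eq_merge text.toList rough 200 0
    simp only [add_zero, sub_zero, Nat.cast_ofNat] at hm
    rw [hm]
    rfl
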